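-- pv_equiv track=rewrite | github.com/WasabiPingKak/VTaxon | backend/app/services/gbif.py | _build_taxon_path
-- ===== SOURCE A (Python) =====
-- RANK_ORDER = ['kingdom', 'phylum', 'class', 'order', 'family', 'genus', 'species']
--
-- def _build_taxon_path(data):
--     """Build materialized path from GBIF hierarchy: Kingdom|Phylum|Class|...|Species.
--
--     Always includes all rank positions (empty string for missing ranks) up to
--     the deepest known rank so that position index == rank index.
--     e.g. Animalia|Chordata|||Arandaspididae|Sacabambaspis
--     """
--     field_map = {
--         'kingdom': 'kingdom',
--         'phylum': 'phylum',
--         'class': 'class',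
--         'order': 'order',
--         'family': 'family',
--         'genus': 'genus',
--         'species': 'species',
--     }
--     parts = []
--     last_non_empty = -1
--     for i, rank in enumerate(RANK_ORDER):
--         value = data.get(field_map[rank])
--         parts.append(value or '')
--         if value:
--             last_non_empty = i
--     if last_non_empty < 0:
--         return None
--     return '|'.join(parts[:last_non_empty + 1])
-- ===== SOURCE B (Python) =====
-- RANK_ORDER = ['kingdom', 'phylum', 'class', 'order', 'family', 'genus', 'species']
--
-- def _build_taxon_path(data):
--     """Recursive right-to-left build: the recursion on the rank list returns the
--     already-joined path for the suffix (None while only empties seen), so no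
--     intermediate parts list, no trimming pass and no join are needed."""
--     def go(ranks):
--         if not ranks:
--             return None
--         rest = go(ranks[1:])
--         v = data.get(ranks[0]) or ''
--         if rest is None:
--             return v if v else None
--         return v + '|' + rest
--     return go(RANK_ORDER)
-- ===== Notes on version B (the rewrite author's own statement) =====
-- stated objective: simpler
-- what changed: B replaces A's forward accumulation loop (parts list + last_non_empty index + slice + join) with a single structural recursion over the rank list from the right: each call returns the already-joined path of its suffix (None while only empties have been seen), so no parts list, no trim/slice and no join step exist.
import Mathlib
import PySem

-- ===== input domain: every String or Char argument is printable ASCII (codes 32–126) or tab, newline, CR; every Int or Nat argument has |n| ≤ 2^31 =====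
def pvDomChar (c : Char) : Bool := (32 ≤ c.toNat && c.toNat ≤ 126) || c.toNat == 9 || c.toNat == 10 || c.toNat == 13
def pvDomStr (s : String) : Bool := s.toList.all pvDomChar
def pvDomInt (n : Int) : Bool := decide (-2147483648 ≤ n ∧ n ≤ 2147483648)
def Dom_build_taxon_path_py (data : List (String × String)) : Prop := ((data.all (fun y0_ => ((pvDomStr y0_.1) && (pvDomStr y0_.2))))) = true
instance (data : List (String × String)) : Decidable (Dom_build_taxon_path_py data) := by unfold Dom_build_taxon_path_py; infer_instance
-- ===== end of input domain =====

-- B builds the path by recursion from the deepest rank upward: the recursion returns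
-- the already-joined path of the suffix (none while only empties), so no parts list,
-- no trimming and no join exist; objective: simpler.

-- ===== PORT A =====
def pvRankOrder : List String :=
  ["kingdom", "phylum", "class", "order", "family", "genus", "species"]

def pvFieldMap : PySem.Dict String String :=
  PySem.Dict.mk [("kingdom", "kingdom"), ("phylum", "phylum"), ("class", "class"),
    ("order", "order"), ("family", "family"), ("genus", "genus"), ("species", "species")]

def build_taxon_path_py (data : List (String × String)) : Option String :=
  let d := PySem.Dict.mk data
  let st := (PySem.List.enumerate pvRankOrder).foldl
    (fun (st : List String × Int) ir =>
      -- value = data.get(field_map[rank]); parts.append(value or ''); if value: last = i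
      let value := d.get? (pvFieldMap.getD ir.2 "")
      let v := value.getD ""          -- `value or ''` (None and '' both become '')
      (st.1 ++ [v], if v ≠ "" then ir.1 else st.2))
    ([], -1)
  if st.2 < 0 then none
  else some (PySem.Str.join "|" (PySem.List.slice st.1 none (some (st.2 + 1))))

-- ===== PORT B =====
-- `go(ranks)`: recursion on the rank list, returning the joined path of the suffix
def pvGo (d : PySem.Dict String String) : List String → Option String
  | [] => none
  | r :: rs =>
    let rest := pvGo d rs
    let v := (d.get? r).getD ""       -- `data.get(ranks[0]) or ''`
    match rest with
    | none => if v = "" then none else some v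
    | some t => some (v ++ "|" ++ t)

def build_taxon_path_py_alt (data : List (String × String)) : Option String :=
  pvGo (PySem.Dict.mk data) pvRankOrder

-- ===== PRECONDITION & SPEC =====
def Spec_build_taxon_path_py (data : List (String × String)) (out : Option String) : Prop := out = build_taxon_path_py_alt data
instance (data : List (String × String)) (out : Option String) : Decidable (Spec_build_taxon_path_py data out) := by unfold Spec_build_taxon_path_py; infer_instance

-- ===== CLAIM (what is proved, stated in full; the proofs are below) =====
def Claim_equal_build_taxon_path_py : Prop := ∀ (data : List (String × String)), Dom_build_taxon_path_py data → Spec_build_taxon_path_py data (build_taxon_path_py data)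

-- ===== LEMMAS AND PROOFS =====
theorem pvFieldMap_k : pvFieldMap.getD "kingdom" "" = "kingdom" := by decide
theorem pvFieldMap_p : pvFieldMap.getD "phylum" "" = "phylum" := by decide
theorem pvFieldMap_c : pvFieldMap.getD "class" "" = "class" := by decide
theorem pvFieldMap_o : pvFieldMap.getD "order" "" = "order" := by decide
theorem pvFieldMap_f : pvFieldMap.getD "family" "" = "family" := by decide
theorem pvFieldMap_g : pvFieldMap.getD "genus" "" = "genus" := by decide
theorem pvFieldMap_s : pvFieldMap.getD "species" "" = "species" := by decide

theorem pvJoin_single (s a : String) : PySem.Str.join s [a] = a := by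
  apply String.toList_injective
  simp [PySem.Chars.join_singleton]

theorem pvJoin_cons (s a b : String) (l : List String) :
    PySem.Str.join s (a :: b :: l) = a ++ s ++ PySem.Str.join s (b :: l) := by
  apply String.toList_injective
  simp [PySem.Chars.join_cons_cons]

-- ===== VERDICT (by name: the statement is the Claim_ definition above) =====
theorem build_taxon_path_py_spec : Claim_equal_build_taxon_path_py := by
  intro data _
  unfold Spec_build_taxon_path_py build_taxon_path_py build_taxon_path_py_alt
    pvRankOrder
  simp only [PySem.List.enumerate_cons, PySem.List.enumerate_nil,
    List.foldl_cons, List.foldl_nil,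
    pvFieldMap_k, pvFieldMap_p, pvFieldMap_c, pvFieldMap_o, pvFieldMap_f,
    pvFieldMap_g, pvFieldMap_s,
    pvGo, List.cons_append, List.nil_append]
  generalize ((PySem.Dict.mk data).get? "kingdom").getD "" = v0
  generalize ((PySem.Dict.mk data).get? "phylum").getD "" = v1
  generalize ((PySem.Dict.mk data).get? "class").getD "" = v2
  generalize ((PySem.Dict.mk data).get? "order").getD "" = v3
  generalize ((PySem.Dict.mk data).get? "family").getD "" = v4
  generalize ((PySem.Dict.mk data).get? "genus").getD "" = v5
  generalize ((PySem.Dict.mk data).get? "species").getD "" = v6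
  by_cases h0 : v0 = "" <;> by_cases h1 : v1 = "" <;> by_cases h2 : v2 = "" <;>
  by_cases h3 : v3 = "" <;> by_cases h4 : v4 = "" <;> by_cases h5 : v5 = "" <;>
  by_cases h6 : v6 = "" <;>
  simp [h0, h1, h2, h3, h4, h5, h6, PySem.List.slice, PySem.List.clampIdx,
    pvJoin_single, pvJoin_cons]
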